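-- pv_equiv track=rewrite | github.com/Slash0BZ/pytorch-pretrained-BERT | scripts/tmparg_processor.py | get_stripped
-- ===== SOURCE A (Python) =====
-- def get_stripped(tokens, tags, verb_pos, tmp_start, tmp_end):
--     new_tokens = []
--     new_verb_pos = -1
--     new_tmp_start = -1
--     new_tmp_end = -1
--     for i in range(0, len(tokens)):
--         if tags[i] != "O":
--             new_tokens.append(tokens[i])
--         if i == verb_pos:
--             new_verb_pos = len(new_tokens) - 1
--         if i == tmp_start:
--             new_tmp_start = len(new_tokens) - 1
--         if i == tmp_end - 1:
--             new_tmp_end = len(new_tokens)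
--     return new_tokens, new_verb_pos, new_tmp_start, new_tmp_end
-- ===== SOURCE B (Python) =====
-- def get_stripped(tokens, tags, verb_pos, tmp_start, tmp_end):
--     n = len(tokens)
--     # prefix table: P[j] = number of non-"O" tags among indices 0..j-1
--     P = [0]
--     c = 0
--     for i in range(n):
--         if tags[i] != "O":
--             c += 1
--         P.append(c)
--     new_tokens = [tokens[i] for i in range(n) if tags[i] != "O"]
--     new_verb_pos = P[verb_pos + 1] - 1 if 0 <= verb_pos < n else -1
--     new_tmp_start = P[tmp_start + 1] - 1 if 0 <= tmp_start < n else -1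
--     new_tmp_end = P[tmp_end] if 1 <= tmp_end <= n else -1
--     return new_tokens, new_verb_pos, new_tmp_start, new_tmp_end
-- ===== Notes on version B (the rewrite author's own statement) =====
-- stated objective: alternative
-- what changed: Replaces A's single stateful loop (appending and updating three indices in-flight) by a prefix-count table over the tags plus a filtering comprehension, with the three remapped indices derived afterwards by guarded table lookups.
import Mathlib
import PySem

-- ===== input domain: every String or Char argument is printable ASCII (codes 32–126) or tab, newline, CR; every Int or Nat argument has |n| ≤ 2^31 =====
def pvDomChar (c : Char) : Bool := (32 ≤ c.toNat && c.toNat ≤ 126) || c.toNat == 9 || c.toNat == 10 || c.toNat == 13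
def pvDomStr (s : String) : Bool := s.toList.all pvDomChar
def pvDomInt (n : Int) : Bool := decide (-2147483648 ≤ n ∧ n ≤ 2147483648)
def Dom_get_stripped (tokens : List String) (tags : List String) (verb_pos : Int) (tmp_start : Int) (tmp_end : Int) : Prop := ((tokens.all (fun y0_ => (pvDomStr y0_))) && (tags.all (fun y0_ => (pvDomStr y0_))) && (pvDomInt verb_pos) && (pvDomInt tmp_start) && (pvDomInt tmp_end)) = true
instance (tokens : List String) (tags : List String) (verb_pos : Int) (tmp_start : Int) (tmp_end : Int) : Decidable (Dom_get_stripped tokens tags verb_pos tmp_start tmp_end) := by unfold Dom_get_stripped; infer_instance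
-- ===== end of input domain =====

-- B replaces A's single stateful loop by a prefix-count table plus a filtering
-- comprehension, deriving the three remapped indices by table lookup (objective:
-- alternative decomposition, same O(n) cost).

-- ===== PORT A =====
-- single loop over range(len(tokens)); tags[i]/tokens[i] are in range on Pre_
def get_stripped (tokens : List String) (tags : List String) (verb_pos : Int) (tmp_start : Int) (tmp_end : Int) : List String × Int × Int × Int :=
  (PySem.List.pyRange 0 (tokens.length : Int) 1).foldl
    (fun (st : List String × Int × Int × Int) i =>
      let nt := if PySem.List.pyGetD tags i "" ≠ "O" then st.1 ++ [PySem.List.pyGetD tokens i ""] else st.1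
      let nv := if i = verb_pos then (nt.length : Int) - 1 else st.2.1
      let ns := if i = tmp_start then (nt.length : Int) - 1 else st.2.2.1
      let ne := if i = tmp_end - 1 then (nt.length : Int) else st.2.2.2
      (nt, nv, ns, ne))
    ([], -1, -1, -1)

-- ===== PORT B =====
-- prefix table P (P[j] = #non-"O" tags among 0..j-1), filtering pass, then lookups;
-- the guarded P[...] lookups are in range, so pyGetD is exact there
def get_stripped_alt (tokens : List String) (tags : List String) (verb_pos : Int) (tmp_start : Int) (tmp_end : Int) : List String × Int × Int × Int :=
  let n : Int := tokens.length
  let pc := (PySem.List.pyRange 0 n 1).foldl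
      (fun (st : List Int × Int) i =>
        let c := if PySem.List.pyGetD tags i "" ≠ "O" then st.2 + 1 else st.2
        (st.1 ++ [c], c)) ([0], 0)
  let P := pc.1
  let new_tokens := (PySem.List.pyRange 0 n 1).foldl
      (fun (acc : List String) i =>
        if PySem.List.pyGetD tags i "" ≠ "O" then acc ++ [PySem.List.pyGetD tokens i ""] else acc) []
  let nv := if 0 ≤ verb_pos ∧ verb_pos < n then PySem.List.pyGetD P (verb_pos + 1) 0 - 1 else -1
  let ns := if 0 ≤ tmp_start ∧ tmp_start < n then PySem.List.pyGetD P (tmp_start + 1) 0 - 1 else -1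
  let ne := if 1 ≤ tmp_end ∧ tmp_end ≤ n then PySem.List.pyGetD P tmp_end 0 else -1
  (new_tokens, nv, ns, ne)

-- ===== PRECONDITION & SPEC =====
-- Pre_ excludes exactly the inputs where Python A raises IndexError (tags shorter than tokens)
def Pre_get_stripped (tokens : List String) (tags : List String) (verb_pos : Int) (tmp_start : Int) (tmp_end : Int) : Prop :=
  tokens.length ≤ tags.length
instance (tokens : List String) (tags : List String) (verb_pos : Int) (tmp_start : Int) (tmp_end : Int) : Decidable (Pre_get_stripped tokens tags verb_pos tmp_start tmp_end) := by unfold Pre_get_stripped; infer_instance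

def pvWitness_get_stripped : List String × List String × Int × Int × Int :=
  (["a", "big", "dog"], ["O", "B", "I"], 1, 1, 3)

def Spec_get_stripped (tokens : List String) (tags : List String) (verb_pos : Int) (tmp_start : Int) (tmp_end : Int) (out : List String × Int × Int × Int) : Prop := out = get_stripped_alt tokens tags verb_pos tmp_start tmp_end
instance (tokens : List String) (tags : List String) (verb_pos : Int) (tmp_start : Int) (tmp_end : Int) (out : List String × Int × Int × Int) : Decidable (Spec_get_stripped tokens tags verb_pos tmp_start tmp_end out) := by unfold Spec_get_stripped; infer_instance

-- ===== CLAIM (what is proved, stated in full; the proofs are below) =====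
def Claim_equal_get_stripped : Prop := ∀ (tokens : List String) (tags : List String) (verb_pos : Int) (tmp_start : Int) (tmp_end : Int), Dom_get_stripped tokens tags verb_pos tmp_start tmp_end → Pre_get_stripped tokens tags verb_pos tmp_start tmp_end → Spec_get_stripped tokens tags verb_pos tmp_start tmp_end (get_stripped tokens tags verb_pos tmp_start tmp_end)

-- ===== LEMMAS AND PROOFS =====

-- the filtered token list after the first m indices
def pvFt (tokens tags : List String) : Nat → List String
  | 0 => []
  | m + 1 => pvFt tokens tags m ++
      (if PySem.List.pyGetD tags (m : Int) "" ≠ "O" then [PySem.List.pyGetD tokens (m : Int) ""] else [])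

-- the prefix count: #non-"O" tags among indices 0..m-1
def pvCnt (tokens tags : List String) (m : Nat) : Int := ((pvFt tokens tags m).length : Int)

-- A's index variables after the first m iterations
def pvAv (tokens tags : List String) (p : Int) (m : Nat) : Int :=
  if 0 ≤ p ∧ p < (m : Int) then pvCnt tokens tags (p.toNat + 1) - 1 else -1
def pvAe (tokens tags : List String) (e : Int) (m : Nat) : Int :=
  if 1 ≤ e ∧ e ≤ (m : Int) then pvCnt tokens tags e.toNat else -1

theorem pvCnt_succ (tokens tags : List String) (m : Nat) :
    pvCnt tokens tags (m + 1) =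
      (if PySem.List.pyGetD tags (m : Int) "" ≠ "O" then pvCnt tokens tags m + 1 else pvCnt tokens tags m) := by
  simp [pvCnt, pvFt]
  split_ifs <;> simp

theorem pvA_loop (tokens tags : List String) (verb_pos tmp_start tmp_end : Int) (m : Nat) :
    (PySem.List.pyRange 0 (m : Int) 1).foldl
      (fun (st : List String × Int × Int × Int) i =>
        let nt := if PySem.List.pyGetD tags i "" ≠ "O" then st.1 ++ [PySem.List.pyGetD tokens i ""] else st.1
        let nv := if i = verb_pos then (nt.length : Int) - 1 else st.2.1
        let ns := if i = tmp_start then (nt.length : Int) - 1 else st.2.2.1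
        let ne := if i = tmp_end - 1 then (nt.length : Int) else st.2.2.2
        (nt, nv, ns, ne))
      ([], -1, -1, -1) =
    (pvFt tokens tags m, pvAv tokens tags verb_pos m, pvAv tokens tags tmp_start m,
      pvAe tokens tags tmp_end m) := by
  induction m with
  | zero =>
      rw [PySem.List.pyRange_one_eq_nil (by omega)]
      simp only [List.foldl_nil, pvFt, pvAv, pvAe]
      rw [if_neg (by omega), if_neg (by omega), if_neg (by omega)]
  | succ m ih =>
      have hcast : ((m + 1 : Nat) : Int) = (m : Int) + 1 := by push_cast; ring
      rw [hcast, PySem.List.pyRange_one_succ_right (by omega), List.foldl_append, ih]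
      simp only [List.foldl_cons, List.foldl_nil]
      refine Prod.ext ?_ (Prod.ext ?_ (Prod.ext ?_ ?_))
      · simp [pvFt]; split_ifs <;> simp
      · have hnt : (if PySem.List.pyGetD tags (m : Int) "" ≠ "O" then
            pvFt tokens tags m ++ [PySem.List.pyGetD tokens (m : Int) ""] else pvFt tokens tags m) =
            pvFt tokens tags (m + 1) := by
          simp [pvFt]; split_ifs <;> simp
        rw [hnt]
        by_cases hv : (m : Int) = verb_pos
        · rw [if_pos hv]
          have h1 : 0 ≤ verb_pos ∧ verb_pos < ((m + 1 : Nat) : Int) := by omega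
          have h2 : verb_pos.toNat + 1 = m + 1 := by omega
          simp only [pvAv]
          rw [if_pos h1, h2]
          simp [pvCnt]
        · rw [if_neg hv]
          by_cases h0 : 0 ≤ verb_pos ∧ verb_pos < (m : Int)
          · have h1 : 0 ≤ verb_pos ∧ verb_pos < ((m + 1 : Nat) : Int) := by omega
            simp only [pvAv]; rw [if_pos h0, if_pos h1]
          · have h1 : ¬ (0 ≤ verb_pos ∧ verb_pos < ((m + 1 : Nat) : Int)) := by omega
            simp only [pvAv]; rw [if_neg h0, if_neg h1]
      · have hnt : (if PySem.List.pyGetD tags (m : Int) "" ≠ "O" then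
            pvFt tokens tags m ++ [PySem.List.pyGetD tokens (m : Int) ""] else pvFt tokens tags m) =
            pvFt tokens tags (m + 1) := by
          simp [pvFt]; split_ifs <;> simp
        rw [hnt]
        by_cases hv : (m : Int) = tmp_start
        · rw [if_pos hv]
          have h1 : 0 ≤ tmp_start ∧ tmp_start < ((m + 1 : Nat) : Int) := by omega
          have h2 : tmp_start.toNat + 1 = m + 1 := by omega
          simp only [pvAv]
          rw [if_pos h1, h2]
          simp [pvCnt]
        · rw [if_neg hv]
          by_cases h0 : 0 ≤ tmp_start ∧ tmp_start < (m : Int)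
          · have h1 : 0 ≤ tmp_start ∧ tmp_start < ((m + 1 : Nat) : Int) := by omega
            simp only [pvAv]; rw [if_pos h0, if_pos h1]
          · have h1 : ¬ (0 ≤ tmp_start ∧ tmp_start < ((m + 1 : Nat) : Int)) := by omega
            simp only [pvAv]; rw [if_neg h0, if_neg h1]
      · have hnt : (if PySem.List.pyGetD tags (m : Int) "" ≠ "O" then
            pvFt tokens tags m ++ [PySem.List.pyGetD tokens (m : Int) ""] else pvFt tokens tags m) =
            pvFt tokens tags (m + 1) := by
          simp [pvFt]; split_ifs <;> simp
        rw [hnt]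
        by_cases hv : (m : Int) = tmp_end - 1
        · rw [if_pos hv]
          have h1 : 1 ≤ tmp_end ∧ tmp_end ≤ ((m + 1 : Nat) : Int) := by omega
          have h2 : tmp_end.toNat = m + 1 := by omega
          simp only [pvAe]
          rw [if_pos h1, h2]
          simp [pvCnt]
        · rw [if_neg hv]
          by_cases h0 : 1 ≤ tmp_end ∧ tmp_end ≤ (m : Int)
          · have h1 : 1 ≤ tmp_end ∧ tmp_end ≤ ((m + 1 : Nat) : Int) := by omega
            simp only [pvAe]; rw [if_pos h0, if_pos h1]
          · have h1 : ¬ (1 ≤ tmp_end ∧ tmp_end ≤ ((m + 1 : Nat) : Int)) := by omega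
            simp only [pvAe]; rw [if_neg h0, if_neg h1]

theorem pvB_tokens (tokens tags : List String) (m : Nat) :
    (PySem.List.pyRange 0 (m : Int) 1).foldl
      (fun (acc : List String) i =>
        if PySem.List.pyGetD tags i "" ≠ "O" then acc ++ [PySem.List.pyGetD tokens i ""] else acc) [] =
    pvFt tokens tags m := by
  induction m with
  | zero => rw [PySem.List.pyRange_one_eq_nil (by omega)]; simp [pvFt]
  | succ m ih =>
      have hcast : ((m + 1 : Nat) : Int) = (m : Int) + 1 := by push_cast; ring
      rw [hcast, PySem.List.pyRange_one_succ_right (by omega), List.foldl_append, ih]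
      simp [pvFt]; split_ifs <;> simp

theorem pvB_prefix (tokens tags : List String) (m : Nat) :
    (PySem.List.pyRange 0 (m : Int) 1).foldl
      (fun (st : List Int × Int) i =>
        let c := if PySem.List.pyGetD tags i "" ≠ "O" then st.2 + 1 else st.2
        (st.1 ++ [c], c)) ([0], 0) =
    ((List.range (m + 1)).map (pvCnt tokens tags), pvCnt tokens tags m) := by
  induction m with
  | zero =>
      rw [PySem.List.pyRange_one_eq_nil (by omega)]
      simp [pvCnt, pvFt]
  | succ m ih =>
      have hcast : ((m + 1 : Nat) : Int) = (m : Int) + 1 := by push_cast; ring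
      rw [hcast, PySem.List.pyRange_one_succ_right (by omega), List.foldl_append, ih]
      simp only [List.foldl_cons, List.foldl_nil]
      rw [← pvCnt_succ]
      rw [List.range_succ (n := m + 1), List.map_append]
      simp

theorem pvP_lookup (tokens tags : List String) (m : Nat) (k : Int) (h0 : 0 ≤ k)
    (h1 : k ≤ (m : Int)) :
    PySem.List.pyGetD ((List.range (m + 1)).map (pvCnt tokens tags)) k 0 =
      pvCnt tokens tags k.toNat := by
  have hk : k.toNat < m + 1 := by omega
  have hkk : k = ((k.toNat : Nat) : Int) := by omega
  rw [hkk, PySem.List.pyGetD_natCast]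
  simp [List.getD_eq_getElem?_getD, hk]
  congr 1
  omega

theorem get_stripped_spec : Claim_equal_get_stripped := by
  intro tokens tags verb_pos tmp_start tmp_end _ _
  simp only [Spec_get_stripped, get_stripped, get_stripped_alt]
  rw [pvA_loop, pvB_tokens, pvB_prefix]
  refine Prod.ext rfl (Prod.ext ?_ (Prod.ext ?_ ?_))
  · simp only [pvAv]
    by_cases h : 0 ≤ verb_pos ∧ verb_pos < (tokens.length : Int)
    · rw [if_pos h, if_pos h, pvP_lookup tokens tags tokens.length (verb_pos + 1) (by omega) (by omega)]
      have : (verb_pos + 1).toNat = verb_pos.toNat + 1 := by omega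
      rw [this]
    · rw [if_neg h, if_neg h]
  · simp only [pvAv]
    by_cases h : 0 ≤ tmp_start ∧ tmp_start < (tokens.length : Int)
    · rw [if_pos h, if_pos h, pvP_lookup tokens tags tokens.length (tmp_start + 1) (by omega) (by omega)]
      have : (tmp_start + 1).toNat = tmp_start.toNat + 1 := by omega
      rw [this]
    · rw [if_neg h, if_neg h]
  · simp only [pvAe]
    by_cases h : 1 ≤ tmp_end ∧ tmp_end ≤ (tokens.length : Int)
    · rw [if_pos h, if_pos h, pvP_lookup tokens tags tokens.length tmp_end (by omega) (by omega)]
    · rw [if_neg h, if_neg h]
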